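-- pv_equiv track=rewrite | github.com/peterbanban/tenbagger_analysis | portfolio_expected_return_1y.py | month_end_dates
-- ===== SOURCE A (Python) =====
-- from typing import Dict, List, Optional, Tuple
--
-- def month_end_dates(dates: List[str]) -> List[str]:
--     out: List[str] = []
--     last_by_month: Dict[str, str] = {}
--     for d in dates:
--         ym = d[:7]
--         if ym not in last_by_month or d > last_by_month[ym]:
--             last_by_month[ym] = d
--     out = sorted(last_by_month.values())
--     return out
-- ===== SOURCE B (Python) =====
-- def month_end_dates(dates):
--     out = []
--     cur_ym = None
--     cur_last = None
--     for d in sorted(dates):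
--         ym = d[:7]
--         if cur_ym is not None and ym != cur_ym:
--             out.append(cur_last)
--         cur_ym = ym
--         cur_last = d
--     if cur_ym is not None:
--         out.append(cur_last)
--     return out
-- ===== Notes on version B (the rewrite author's own statement) =====
-- stated objective: alternative
-- what changed: A builds a per-month dictionary of maximal dates and sorts its values at the end; B sorts the input once up front and makes a single linear scan that emits the last date of each contiguous year-month run, maintaining no dictionary and needing no final sort.
import Mathlib
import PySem

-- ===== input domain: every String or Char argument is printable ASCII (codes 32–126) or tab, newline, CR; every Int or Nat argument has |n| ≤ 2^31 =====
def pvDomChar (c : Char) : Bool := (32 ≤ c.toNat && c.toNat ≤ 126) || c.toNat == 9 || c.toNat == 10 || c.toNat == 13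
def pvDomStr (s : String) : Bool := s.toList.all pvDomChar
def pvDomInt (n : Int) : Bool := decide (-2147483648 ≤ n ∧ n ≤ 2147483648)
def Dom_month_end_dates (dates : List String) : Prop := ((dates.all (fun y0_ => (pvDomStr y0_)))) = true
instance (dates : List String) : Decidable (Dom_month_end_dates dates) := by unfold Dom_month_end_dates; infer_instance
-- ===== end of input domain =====

-- B replaces A's per-month dictionary of maxima followed by a final sort with one sort
-- up front and a single linear scan emitting the last date of each year-month run
-- (objective: alternative decomposition; same return value).

-- ===== PORT A =====
-- one loop step of A: 'if ym not in last_by_month or d > last_by_month[ym]: last_by_month[ym] = d'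
-- (the '||' short-circuits exactly as Python's 'or': the getD default "" is never the
-- deciding value, because the left disjunct is true whenever the key is absent)
def aStep (m : PySem.Dict String String) (d : String) : PySem.Dict String String :=
  let ym := PySem.Str.slice d none (some 7)
  if (!m.contains ym) || decide (m.getD ym "" < d) then m.insert ym d else m

def month_end_dates (dates : List String) : List String :=
  let last_by_month := dates.foldl aStep PySem.Dict.empty
  PySem.List.sorted last_by_month.values (fun x => x) false

-- ===== PORT B =====
-- B's scan over the sorted list: state (cur_ym, cur_last); emit cur_last when the month changes
def meScan (ym last : String) : List String → List String
  | [] => [last]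
  | d :: rest =>
      let ymd := PySem.Str.slice d none (some 7)
      if ymd == ym then meScan ymd d rest else last :: meScan ymd d rest

def month_end_dates_alt (dates : List String) : List String :=
  match PySem.List.sorted dates (fun x => x) false with
  | [] => []
  | d :: rest => meScan (PySem.Str.slice d none (some 7)) d rest

-- ===== PRECONDITION & SPEC =====
def Spec_month_end_dates (dates : List String) (out : List String) : Prop := out = month_end_dates_alt dates
instance (dates : List String) (out : List String) : Decidable (Spec_month_end_dates dates out) := by unfold Spec_month_end_dates; infer_instance

-- ===== CLAIM (what is proved, stated in full; the proofs are below) =====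
def Claim_equal_month_end_dates : Prop := ∀ (dates : List String), Dom_month_end_dates dates → Spec_month_end_dates dates (month_end_dates dates)

-- ===== LEMMAS AND PROOFS =====

-- d[:7] as a String: the grouping key both programs use
def keyS (s : String) : String := PySem.Str.slice s none (some 7)

-- running max of a list of strings (none on []), the value A's dict stores per key
def myMaxStep (acc : Option String) (y : String) : Option String :=
  match acc with
  | none => some y
  | some m => if m < y then some y else acc

def myMax (l : List String) : Option String := l.foldl myMaxStep none

theorem nil_le_chars (x : List Char) : ([] : List Char) ≤ x := by
  cases x with
  | nil => exact le_refl _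
  | cons a t => exact le_of_lt (List.Lex.nil)

theorem take_mono_chars (a b : List Char) (n : Nat) (h : a ≤ b) : a.take n ≤ b.take n := by
  rcases lt_or_eq_of_le h with hlt | rfl
  · clear h
    induction hlt generalizing n with
    | nil => simpa using nil_le_chars _
    | @cons x l l' hl ih =>
        cases n with
        | zero => simp
        | succ m => simpa using List.cons_le_cons x (ih m)
    | @rel x y l l' hr =>
        cases n with
        | zero => simp
        | succ m => exact le_of_lt (List.Lex.rel hr)
  · exact le_refl _

theorem keyS_toList (s : String) : (keyS s).toList = s.toList.take 7 := by
  simp [keyS, pysem]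

theorem keyS_mono {a b : String} (h : a ≤ b) : keyS a ≤ keyS b := by
  rw [String.le_iff_toList_le] at h ⊢
  rw [keyS_toList, keyS_toList]
  exact take_mono_chars _ _ 7 h

theorem myMax_run (t : List String) : ∀ (m : String),
    ∃ z, t.foldl myMaxStep (some m) = some z ∧ z ∈ m :: t ∧ ∀ y ∈ m :: t, y ≤ z := by
  induction t with
  | nil => intro m; exact ⟨m, rfl, by simp, by simp⟩
  | cons d r ih =>
      intro m
      by_cases h : m < d
      · obtain ⟨z, hz, hmem, hle⟩ := ih d
        refine ⟨z, by simpa [myMaxStep, h] using hz, ?_, ?_⟩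
        · rcases List.mem_cons.mp hmem with h' | h' <;> simp [h']
        · intro y hy
          rcases List.mem_cons.mp hy with rfl | hy'
          · exact le_trans (le_of_lt h) (hle d (by simp))
          · exact hle y hy'
      · obtain ⟨z, hz, hmem, hle⟩ := ih m
        refine ⟨z, by simpa [myMaxStep, h] using hz, ?_, ?_⟩
        · rcases List.mem_cons.mp hmem with h' | h' <;> simp [h']
        · intro y hy
          rcases List.mem_cons.mp hy with rfl | hy'
          · exact hle y (by simp)
          · rcases List.mem_cons.mp hy' with rfl | hy''
            · exact le_trans (le_of_not_gt h) (hle m (by simp))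
            · exact hle y (by simp [hy''])

theorem myMax_spec (l : List String) (x : String) :
    myMax l = some x ↔ x ∈ l ∧ ∀ y ∈ l, y ≤ x := by
  cases l with
  | nil => simp [myMax]
  | cons m t =>
      obtain ⟨z, hz, hmem, hle⟩ := myMax_run t m
      have hrun : myMax (m :: t) = some z := by simpa [myMax, myMaxStep] using hz
      rw [hrun]
      constructor
      · rintro h; cases h; exact ⟨hmem, hle⟩
      · rintro ⟨hx, hall⟩
        have : z = x := le_antisymm (hall z hmem) (hle x hx)
        simp [this]

theorem myMax_append (xs : List String) (d : String) :
    myMax (xs ++ [d]) = myMaxStep (myMax xs) d := by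
  simp [myMax, List.foldl_append]

theorem aStep_eq (m : PySem.Dict String String) (d : String) :
    aStep m d = (if (!m.contains (keyS d)) || decide (m.getD (keyS d) "" < d)
      then m.insert (keyS d) d else m) := rfl

theorem aStep_nodup (m : PySem.Dict String String) (d : String)
    (h : m.keys.Nodup) : (aStep m d).keys.Nodup := by
  rw [aStep_eq]
  split_ifs
  · exact PySem.Dict.nodup_keys_insert _ _ _ h
  · exact h

theorem aStep_get? (m : PySem.Dict String String) (d : String) (l : List String)
    (h2 : ∀ k, m.get? k = myMax (l.filter (fun y => keyS y == k))) (k : String) :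
    (aStep m d).get? k = myMax ((l ++ [d]).filter (fun y => keyS y == k)) := by
  have hfil : ∀ k, (l ++ [d]).filter (fun y => keyS y == k)
      = l.filter (fun y => keyS y == k) ++ (if keyS d == k then [d] else []) := by
    intro k; simp [List.filter_append]; split_ifs <;> simp_all
  by_cases hk : k = keyS d
  · subst hk
    rw [hfil, if_pos (by simp), myMax_append, ← h2]
    rw [aStep_eq, PySem.Dict.contains_eq_isSome_get?, PySem.Dict.getD_eq_get?_getD]
    cases hv : m.get? (keyS d) with
    | none => simp [PySem.Dict.get?_insert_self, myMaxStep]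
    | some v =>
        by_cases hlt : v < d
        · simp [hlt, PySem.Dict.get?_insert_self, myMaxStep]
        · simp [hv, hlt, myMaxStep]
  · rw [hfil, if_neg (by simpa using fun h => hk h.symm), List.append_nil, ← h2]
    rw [aStep_eq]
    split_ifs
    · exact PySem.Dict.get?_insert_of_ne (hne := hk) ..
    · rfl

-- invariant of A's dictionary loop
theorem aFold_inv (ds : List String) : ∀ (m : PySem.Dict String String) (l : List String),
    m.keys.Nodup → (∀ k, m.get? k = myMax (l.filter (fun y => keyS y == k))) →
    (ds.foldl aStep m).keys.Nodup ∧
      ∀ k, (ds.foldl aStep m).get? k = myMax ((l ++ ds).filter (fun y => keyS y == k)) := by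
  induction ds with
  | nil => intro m l h1 h2; simpa using ⟨h1, h2⟩
  | cons d ds ih =>
      intro m l h1 h2
      have := ih (aStep m d) (l ++ [d]) (aStep_nodup m d h1) (aStep_get? m d l h2)
      simpa using this

theorem aFold_main (dates : List String) :
    (dates.foldl aStep PySem.Dict.empty).keys.Nodup ∧
      ∀ k, (dates.foldl aStep PySem.Dict.empty).get? k
          = myMax (dates.filter (fun y => keyS y == k)) := by
  have := aFold_inv dates PySem.Dict.empty [] (by simp [PySem.Dict.empty]) (by
    intro k; simp [PySem.Dict.get?_empty, myMax])
  simpa using this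

theorem get?_char (dates : List String) (k v : String)
    (h : (dates.foldl aStep PySem.Dict.empty).get? k = some v) :
    keyS v = k ∧ v ∈ dates ∧ ∀ y ∈ dates, keyS y = k → y ≤ v := by
  rw [(aFold_main dates).2 k, myMax_spec] at h
  obtain ⟨hm, hle⟩ := h
  have hk : keyS v = k := by simpa using (List.mem_filter.mp hm).2
  refine ⟨hk, (List.mem_filter.mp hm).1, fun y hy hky => hle y ?_⟩
  exact List.mem_filter.mpr ⟨hy, by simp [hky]⟩

theorem values_mem (dates : List String) (v : String) :
    v ∈ (dates.foldl aStep PySem.Dict.empty).values ↔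
      v ∈ dates ∧ ∀ y ∈ dates, keyS y = keyS v → y ≤ v := by
  obtain ⟨h1, h2⟩ := aFold_main dates
  constructor
  · intro hv
    simp only [PySem.Dict.values, List.mem_map] at hv
    obtain ⟨p, hp, rfl⟩ := hv
    have hg := PySem.Dict.get?_of_mem_items _ (show (p.1, p.2) ∈ _ by simpa using hp) h1
    obtain ⟨hk, hmem, hle⟩ := get?_char dates p.1 p.2 hg
    exact ⟨hmem, fun y hy hky => hle y hy (hk ▸ hky)⟩
  · rintro ⟨hv, hall⟩
    have hg : (dates.foldl aStep PySem.Dict.empty).get? (keyS v) = some v := by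
      rw [h2, myMax_spec]
      refine ⟨List.mem_filter.mpr ⟨hv, by simp⟩, fun y hy => ?_⟩
      obtain ⟨hy1, hy2⟩ := List.mem_filter.mp hy
      exact hall y hy1 (by simpa using hy2)
    have := PySem.Dict.mem_items_of_get?_eq_some _ hg
    simp only [PySem.Dict.values, List.mem_map]
    exact ⟨(keyS v, v), this, rfl⟩

theorem values_nodup (dates : List String) :
    (dates.foldl aStep PySem.Dict.empty).values.Nodup := by
  obtain ⟨h1, _⟩ := aFold_main dates
  have hitems : (dates.foldl aStep PySem.Dict.empty).items.Nodup :=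
    List.Nodup.of_map _ h1
  refine List.Nodup.map_on ?_ hitems
  intro p hp q hq hpq
  have hgp := PySem.Dict.get?_of_mem_items _ (show (p.1, p.2) ∈ _ by simpa using hp) h1
  have hgq := PySem.Dict.get?_of_mem_items _ (show (q.1, q.2) ∈ _ by simpa using hq) h1
  have h1p := (get?_char dates p.1 p.2 hgp).1
  have h1q := (get?_char dates q.1 q.2 hgq).1
  have : p.1 = q.1 := by rw [← h1p, ← h1q, hpq]
  exact Prod.ext this hpq

theorem meScan_cons (ym last d : String) (rest : List String) :
    meScan ym last (d :: rest) =
      if keyS d == ym then meScan (keyS d) d rest else last :: meScan (keyS d) d rest := rfl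

-- specification of B's scan on a ≤-sorted list: strictly increasing, and it contains
-- exactly the elements that are maximal among all elements sharing their d[:7] key
theorem meScan_spec (t : List String) : ∀ (h : String), List.Pairwise (· ≤ ·) (h :: t) →
    List.Pairwise (· < ·) (meScan (keyS h) h t) ∧
      ∀ x, x ∈ meScan (keyS h) h t ↔
        x ∈ h :: t ∧ ∀ y ∈ h :: t, keyS y = keyS x → y ≤ x := by
  induction t with
  | nil =>
      intro h _
      refine ⟨by simp [meScan], fun x => ?_⟩
      simp only [meScan, List.mem_cons, List.not_mem_nil, or_false]
      constructor
      · rintro rfl; exact ⟨rfl, by rintro y rfl _; exact le_refl _⟩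
      · rintro ⟨rfl, _⟩; rfl
  | cons d rest ih =>
      intro h hp
      rw [List.pairwise_cons] at hp
      obtain ⟨hht, hp'⟩ := hp
      have hhd : h ≤ d := hht d (by simp)
      have hdz : ∀ z ∈ d :: rest, d ≤ z := by
        intro z hz
        rcases List.mem_cons.mp hz with rfl | hz'
        · exact le_refl _
        · exact (List.pairwise_cons.mp hp').1 z hz'
      obtain ⟨ihPW, ihMem⟩ := ih d hp'
      rw [meScan_cons]
      by_cases hk : keyS d = keyS h
      · rw [if_pos (by simp [hk])]
        refine ⟨ihPW, fun x => ?_⟩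
        rw [ihMem x]
        constructor
        · rintro ⟨hx, hall⟩
          refine ⟨List.mem_cons_of_mem _ hx, ?_⟩
          intro y hy hky
          rcases List.mem_cons.mp hy with rfl | hy'
          · exact hht x hx
          · exact hall y hy' hky
        · rintro ⟨hx, hall⟩
          rcases List.mem_cons.mp hx with rfl | hx'
          · have hdx : d ≤ x := hall d (by simp) (by rw [hk])
            have : d = x := le_antisymm hdx hhd
            subst this
            exact ⟨by simp, fun y hy hky => hall y (List.mem_cons_of_mem _ hy) hky⟩
          · exact ⟨hx', fun y hy hky => hall y (List.mem_cons_of_mem _ hy) hky⟩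
      · rw [if_neg (by simpa using hk)]
        have hkey : ∀ z ∈ d :: rest, keyS z ≠ keyS h := by
          intro z hz he
          exact hk (le_antisymm (he ▸ keyS_mono (hdz z hz)) (keyS_mono hhd))
        have hsub : ∀ z ∈ meScan (keyS d) d rest, z ∈ d :: rest := by
          intro z hz; exact ((ihMem z).mp hz).1
        have hlt : ∀ z ∈ meScan (keyS d) d rest, h < z := by
          intro z hz
          refine lt_of_le_of_ne (hht z (hsub z hz)) ?_
          intro he; exact hkey z (hsub z hz) (by rw [← he])
        refine ⟨List.pairwise_cons.mpr ⟨hlt, ihPW⟩, fun x => ?_⟩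
        rw [List.mem_cons]
        constructor
        · rintro (rfl | hx)
          · refine ⟨by simp, ?_⟩
            intro y hy hky
            rcases List.mem_cons.mp hy with rfl | hy'
            · exact le_refl _
            · exact absurd hky (hkey y hy')
          · obtain ⟨hx', hall⟩ := (ihMem x).mp hx
            refine ⟨List.mem_cons_of_mem _ hx', ?_⟩
            intro y hy hky
            rcases List.mem_cons.mp hy with rfl | hy'
            · exact hht x hx'
            · exact hall y hy' hky
        · rintro ⟨hx, hall⟩
          rcases List.mem_cons.mp hx with rfl | hx'
          · exact Or.inl rfl
          · exact Or.inr ((ihMem x).mpr ⟨hx', fun y hy hky => hall y (List.mem_cons_of_mem _ hy) hky⟩)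

-- ===== VERDICT (by name: the statement is the Claim_ definition above) =====
theorem month_end_dates_spec : Claim_equal_month_end_dates := by
  intro dates _
  unfold Spec_month_end_dates month_end_dates month_end_dates_alt
  cases hss : PySem.List.sorted dates (fun x => x) false with
  | nil =>
      have hd : dates = [] := (PySem.List.sorted_eq_nil_iff dates _ false).mp hss
      subst hd
      rfl
  | cons h t =>
      have hpw : List.Pairwise (· ≤ ·) (h :: t) := by
        have := PySem.List.sorted_pairwise dates (fun x => x)
        rw [hss] at this
        simpa using this
      obtain ⟨hPWlt, hmem⟩ := meScan_spec t h hpw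
      have hperm : (h :: t).Perm dates := by
        have := PySem.List.sorted_perm dates (fun x => x) false
        rwa [hss] at this
      -- membership of B's output = membership of A's dict values
      have hiff : ∀ x, x ∈ meScan (keyS h) h t ↔
          x ∈ (dates.foldl aStep PySem.Dict.empty).values := by
        intro x
        rw [hmem x, values_mem]
        constructor
        · rintro ⟨hx, hall⟩
          exact ⟨hperm.mem_iff.mp hx, fun y hy => hall y (hperm.mem_iff.mpr hy)⟩
        · rintro ⟨hx, hall⟩
          exact ⟨hperm.mem_iff.mpr hx, fun y hy => hall y (hperm.mem_iff.mp hy)⟩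
      have hnodupM : (meScan (keyS h) h t).Nodup :=
        List.Pairwise.imp ne_of_lt hPWlt
      have hpermVM : (dates.foldl aStep PySem.Dict.empty).values.Perm (meScan (keyS h) h t) :=
        (List.perm_ext_iff_of_nodup (values_nodup dates) hnodupM).mpr
          (fun a => ⟨fun ha => (hiff a).mpr ha, fun ha => (hiff a).mp ha⟩)
      have hpermA : (PySem.List.sorted (dates.foldl aStep PySem.Dict.empty).values
          (fun x => x) false).Perm (meScan (keyS h) h t) :=
        (PySem.List.sorted_perm _ _ _).trans hpermVM
      have hpwA : List.Pairwise (fun a b => a ≤ b)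
          (PySem.List.sorted (dates.foldl aStep PySem.Dict.empty).values (fun x => x) false) := by
        simpa using PySem.List.sorted_pairwise (dates.foldl aStep PySem.Dict.empty).values (fun x => x)
      have hpwM : List.Pairwise (fun a b => a ≤ b) (meScan (keyS h) h t) :=
        List.Pairwise.imp le_of_lt hPWlt
      simpa using PySem.List.eq_of_perm_of_pairwise_le_of_injective (fun x => x)
        (fun _ _ hxy => hxy) hpermA hpwA hpwM
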